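-- pv_equiv track=rewrite | github.com/Itmanuser/QuestionBankExercise | 中等/030_字符串合并处理.py | handle_paixu
-- ===== SOURCE A (Python) =====
-- def handle_paixu(n):
--     jishu = []
--     oushu = []
--     for i in range(1,len(n)+1):
--         if i % 2 == 0:
--             oushu.append(n[i-1])
--         else:
--             jishu.append(n[i-1])
--     jishu = sorted(jishu)
--     oushu = sorted(oushu, reverse=False)
--     new_n = ''
--     for i in range(1, len(n)+1):
--         if i % 2 != 0:
--             new_n +=  jishu[(i-1)//2]
--         else:
--             new_n += oushu[(i-1) // 2]
--     return new_n
-- ===== SOURCE B (Python) =====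
-- def handle_paixu(n):
--     odd = sorted(n[::2])
--     even = sorted(n[1::2])
--     merged = ''.join(a + b for a, b in zip(odd, even))
--     return merged + ''.join(odd[len(even):])
-- ===== Notes on version B (the rewrite author's own statement) =====
-- stated objective: simpler
-- what changed: Replaces both 1-based parity loops (split loop with i%2 tests, rebuild loop with (i-1)//2 index arithmetic and repeated string +=) by stride slices n[::2]/n[1::2] and a direct zip-interleave of the two sorted halves joined once, plus the leftover tail.
import Mathlib
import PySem

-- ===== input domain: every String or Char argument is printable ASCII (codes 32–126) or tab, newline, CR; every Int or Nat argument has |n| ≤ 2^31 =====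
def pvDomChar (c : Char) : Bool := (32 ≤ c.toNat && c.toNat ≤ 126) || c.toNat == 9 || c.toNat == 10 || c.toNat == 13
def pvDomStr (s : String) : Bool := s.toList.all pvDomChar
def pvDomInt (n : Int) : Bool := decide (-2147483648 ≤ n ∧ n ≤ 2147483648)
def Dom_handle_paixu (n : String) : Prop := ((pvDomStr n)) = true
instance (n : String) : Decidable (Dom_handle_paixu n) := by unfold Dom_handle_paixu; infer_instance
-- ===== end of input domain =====

-- B replaces the two 1-based parity loops by stride slices and a zip-interleave of the
-- sorted halves (objective: simpler).

-- ===== PORT A =====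
def handle_paixu (n : String) : String :=
  let l := n.toList
  let p := (PySem.List.pyRange 1 ((l.length : Int) + 1) 1).foldl
    (fun (p : List Char × List Char) i =>
      if PySem.Int.mod i 2 = 0 then (p.1, p.2 ++ [PySem.List.pyGetD l (i - 1) ' '])
      else (p.1 ++ [PySem.List.pyGetD l (i - 1) ' '], p.2)) ([], [])
  let jishu := PySem.List.sorted p.1 (fun c => c) false
  let oushu := PySem.List.sorted p.2 (fun c => c) false
  let new_n := (PySem.List.pyRange 1 ((l.length : Int) + 1) 1).foldl
    (fun (s : List Char) i =>
      if PySem.Int.mod i 2 ≠ 0 then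
        s ++ [PySem.List.pyGetD jishu (PySem.Int.floordiv (i - 1) 2) ' ']
      else
        s ++ [PySem.List.pyGetD oushu (PySem.Int.floordiv (i - 1) 2) ' ']) []
  String.ofList new_n

-- ===== PORT B =====
def handle_paixu_alt (n : String) : String :=
  let l := n.toList
  let odd := PySem.List.sorted ((PySem.List.slice? l none none 2).getD []) (fun c => c) false
  let even := PySem.List.sorted ((PySem.List.slice? l (some 1) none 2).getD []) (fun c => c) false
  String.ofList ((odd.zip even).flatMap (fun p => [p.1, p.2]) ++ odd.drop even.length)

-- ===== PRECONDITION & SPEC =====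
def Spec_handle_paixu (n : String) (out : String) : Prop := out = handle_paixu_alt n
instance (n : String) (out : String) : Decidable (Spec_handle_paixu n out) := by unfold Spec_handle_paixu; infer_instance

-- ===== CLAIM (what is proved, stated in full; the proofs are below) =====
def Claim_equal_handle_paixu : Prop := ∀ (n : String), Dom_handle_paixu n → Spec_handle_paixu n (handle_paixu n)

-- ===== LEMMAS AND PROOFS =====

-- characters at even 0-based positions
def pvEo : List Char → List Char
  | [] => []
  | [a] => [a]
  | a :: _ :: t => a :: pvEo t

-- characters at odd 0-based positions
def pvOo : List Char → List Char
  | [] => []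
  | [_] => []
  | _ :: b :: t => b :: pvOo t

-- the interleaving B builds
def pvT (js os : List Char) : List Char :=
  (js.zip os).flatMap (fun p => [p.1, p.2]) ++ js.drop os.length

lemma pvEo_snoc (xs : List Char) (x : Char) :
    pvEo (xs ++ [x]) = if xs.length % 2 = 0 then pvEo xs ++ [x] else pvEo xs := by
  induction xs using pvEo.induct with
  | case1 => simp [pvEo]
  | case2 a => simp [pvEo]
  | case3 a b t ih => simp [pvEo, ih]; split_ifs <;> simp_all <;> omega

lemma pvOo_snoc (xs : List Char) (x : Char) :
    pvOo (xs ++ [x]) = if xs.length % 2 = 0 then pvOo xs else pvOo xs ++ [x] := by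
  induction xs using pvOo.induct with
  | case1 => simp [pvOo]
  | case2 a => simp [pvOo]
  | case3 a b t ih => simp [pvOo, ih]; split_ifs <;> simp_all <;> omega

lemma pvEo_oo_len (l : List Char) :
    (pvEo l).length + (pvOo l).length = l.length ∧
    (pvOo l).length ≤ (pvEo l).length ∧ (pvEo l).length ≤ (pvOo l).length + 1 := by
  induction l using pvEo.induct with
  | case1 => simp [pvEo, pvOo]
  | case2 a => simp [pvEo, pvOo]
  | case3 a b t ih => simp [pvEo, pvOo]; omega

lemma pvFm_eo (l : List Char) :
    List.filterMap (fun k => l[2 * k]?) (List.range ((l.length + 1) / 2)) = pvEo l := by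
  induction l using pvEo.induct with
  | case1 => simp [pvEo]
  | case2 a => simp [pvEo, List.range_succ]
  | case3 a b t ih =>
      have h : ((a :: b :: t).length + 1) / 2 = (t.length + 1) / 2 + 1 := by
        simp; omega
      rw [h, List.range_succ_eq_map, List.filterMap_cons, List.filterMap_map]
      simp only [Nat.mul_zero, List.getElem?_cons_zero]
      have hcomp : ∀ k : Nat, (a :: b :: t)[2 * (k + 1)]? = t[2 * k]? := by
        intro k
        have : 2 * (k + 1) = 2 * k + 1 + 1 := by omega
        rw [this]; simp
      simp only [Function.comp_def, hcomp, ih, pvEo]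

lemma pvOo_tail (l : List Char) : pvOo l = pvEo l.tail := by
  induction l using pvOo.induct with
  | case1 => simp [pvOo, pvEo]
  | case2 a => simp [pvOo, pvEo]
  | case3 a b t ih =>
      rcases t with _ | ⟨c, t'⟩
      · simp [pvOo, pvEo]
      · simpa [pvOo, pvEo] using ih

lemma pvFm_oo (l : List Char) :
    List.filterMap (fun k => l[2 * k + 1]?) (List.range (l.length / 2)) = pvOo l := by
  rcases l with _ | ⟨a, ls⟩
  · simp [pvOo]
  · rw [pvOo_tail]
    simp only [List.getElem?_cons_succ, List.tail_cons]
    have h : (a :: ls).length / 2 = (ls.length + 1) / 2 := by simp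
    rw [h]
    exact pvFm_eo ls

lemma pvSlice_eo (l : List Char) :
    (PySem.List.slice? l none none 2).getD [] = pvEo l := by
  have h : PySem.List.slice? l none none 2 = some (pvEo l) := by
    rw [PySem.List.slice?]
    norm_num [PySem.List.sliceIndices]
    have hc : (if 0 < l.length then (((l.length : Int) + 2 - 1) / 2).toNat else 0)
        = (l.length + 1) / 2 := by split_ifs with h <;> omega
    rw [hc]
    have hix : ∀ x : Nat, ((2 * (x : Int)).toNat) = 2 * x := by intro x; omega
    simp only [hix]
    exact pvFm_eo l
  rw [h]; rfl

lemma pvSlice_oo (l : List Char) :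
    (PySem.List.slice? l (some 1) none 2).getD [] = pvOo l := by
  have h : PySem.List.slice? l (some 1) none 2 = some (pvOo l) := by
    rw [PySem.List.slice?]
    norm_num [PySem.List.sliceIndices]
    rcases l with _ | ⟨a, ls⟩
    · simp [pvOo]
    · have hm : min (1 : Int) ((a :: ls).length : Int) = 1 := by simp
      rw [hm]
      have hc : (if 1 < (a :: ls).length then
            ((((a :: ls).length : Int) - 1 + 2 - 1) / 2).toNat else 0)
          = (a :: ls).length / 2 := by
        split_ifs with h <;> simp only [List.length_cons] at h ⊢ <;> omega
      rw [hc]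
      have hix : ∀ x : Nat, (((1 : Int) + 2 * (x : Int)).toNat) = 2 * x + 1 := by
        intro x; omega
      simp only [hix]
      exact pvFm_oo (a :: ls)
  rw [h]; rfl

lemma pvSplitA (l : List Char) :
    (PySem.List.pyRange 1 ((l.length : Int) + 1) 1).foldl
      (fun (p : List Char × List Char) i =>
        if PySem.Int.mod i 2 = 0 then (p.1, p.2 ++ [PySem.List.pyGetD l (i - 1) ' '])
        else (p.1 ++ [PySem.List.pyGetD l (i - 1) ' '], p.2)) ([], [])
      = (pvEo l, pvOo l) := by
  rw [PySem.List.pyRange_one]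
  have hn : (((l.length : Int) + 1 - 1)).toNat = l.length := by omega
  rw [hn, List.foldl_map]
  suffices h : ∀ k, k ≤ l.length →
      (List.range k).foldl
        (fun (p : List Char × List Char) (x : Nat) =>
          if PySem.Int.mod (1 + (x : Int)) 2 = 0 then
            (p.1, p.2 ++ [PySem.List.pyGetD l (1 + (x : Int) - 1) ' '])
          else (p.1 ++ [PySem.List.pyGetD l (1 + (x : Int) - 1) ' '], p.2)) ([], [])
      = (pvEo (l.take k), pvOo (l.take k)) by
    simpa using h l.length le_rfl
  intro k
  induction k with
  | zero => simp [pvEo, pvOo]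
  | succ k ih =>
      intro hk1
      have hkl : k < l.length := by omega
      rw [List.range_succ, List.foldl_append, ih (by omega)]
      simp only [List.foldl_cons, List.foldl_nil]
      have htake : l.take (k + 1) = l.take k ++ [l[k]] := by
        rw [List.take_add_one]; simp [List.getElem?_eq_getElem hkl]
      have hmod : PySem.Int.mod (1 + (k : Int)) 2 = (((1 + k) % 2 : Nat) : Int) := by
        exact_mod_cast PySem.Int.mod_natCast (1 + k) 2
      have hget : PySem.List.pyGetD l (1 + (k : Int) - 1) ' ' = l[k] := by
        have h1 : (1 + (k : Int) - 1) = ((k : Nat) : Int) := by omega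
        rw [h1, PySem.List.pyGetD_natCast]
        simp [List.getD, List.getElem?_eq_getElem hkl]
      have hmin : (l.take k).length = k := by simp; omega
      rw [htake, pvEo_snoc, pvOo_snoc, hmin]
      by_cases hp : k % 2 = 0
      · have h2 : PySem.Int.mod (1 + (k : Int)) 2 ≠ 0 := by
          intro hcon; rw [hmod] at hcon; omega
        rw [if_pos hp, if_pos hp, if_neg h2, hget]
      · have h2 : PySem.Int.mod (1 + (k : Int)) 2 = 0 := by rw [hmod]; omega
        rw [if_neg hp, if_neg hp, if_pos h2, hget]

lemma pvT_cons (a b : Char) (js os : List Char) :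
    pvT (a :: js) (b :: os) = a :: b :: pvT js os := by
  simp [pvT]

lemma pvT_len (js os : List Char) (hle : os.length ≤ js.length) :
    (pvT js os).length = js.length + os.length := by
  simp [pvT]; omega

lemma pvT_get (js os : List Char) (hle : os.length ≤ js.length)
    (hge : js.length ≤ os.length + 1) (k : Nat) (hk : k < js.length + os.length) :
    (pvT js os)[k]? = if k % 2 = 0 then js[k / 2]? else os[k / 2]? := by
  induction js generalizing os k with
  | nil => simp at hle; subst hle; simp at hk
  | cons a js' ih =>
      cases os with
      | nil =>
          have hl : (a :: js').length ≤ ([] : List Char).length + 1 := hge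
          simp only [List.length_cons, List.length_nil] at hl hk
          have hjs : js' = [] := List.eq_nil_of_length_eq_zero (by omega)
          subst hjs
          have hk0 : k = 0 := by simp at hk; omega
          subst hk0
          simp [pvT]
      | cons b os' =>
          match k with
          | 0 => simp [pvT_cons]
          | 1 => simp [pvT_cons]
          | (m + 2) =>
              rw [pvT_cons]
              simp only [List.getElem?_cons_succ]
              have h1 : os'.length ≤ js'.length := by simp at hle; omega
              have h2 : js'.length ≤ os'.length + 1 := by simp at hge; omega
              have h3 : m < js'.length + os'.length := by simp at hk; omega
              rw [ih os' h1 h2 m h3]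
              have hm2 : (m + 2) % 2 = m % 2 := by omega
              have hd2 : (m + 2) / 2 = m / 2 + 1 := by omega
              rw [hm2, hd2]
              split_ifs <;> simp

lemma pvBuildA (js os : List Char) (hle : os.length ≤ js.length)
    (hge : js.length ≤ os.length + 1) :
    (PySem.List.pyRange 1 (((js.length + os.length : Nat) : Int) + 1) 1).foldl
      (fun (s : List Char) i =>
        if PySem.Int.mod i 2 ≠ 0 then
          s ++ [PySem.List.pyGetD js (PySem.Int.floordiv (i - 1) 2) ' ']
        else
          s ++ [PySem.List.pyGetD os (PySem.Int.floordiv (i - 1) 2) ' ']) []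
      = pvT js os := by
  rw [PySem.List.pyRange_one]
  have hn : ((((js.length + os.length : Nat) : Int) + 1 - 1)).toNat
      = js.length + os.length := by omega
  rw [hn, List.foldl_map]
  suffices h : ∀ k, k ≤ js.length + os.length →
      (List.range k).foldl
        (fun (s : List Char) (x : Nat) =>
          if PySem.Int.mod (1 + (x : Int)) 2 ≠ 0 then
            s ++ [PySem.List.pyGetD js (PySem.Int.floordiv (1 + (x : Int) - 1) 2) ' ']
          else
            s ++ [PySem.List.pyGetD os (PySem.Int.floordiv (1 + (x : Int) - 1) 2) ' ']) []
      = (pvT js os).take k by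
    have h2 := h (js.length + os.length) le_rfl
    rw [h2, ← pvT_len js os hle]
    simp
  intro k
  induction k with
  | zero => simp
  | succ k ih =>
      intro hk1
      have hkl : k < js.length + os.length := by omega
      rw [List.range_succ, List.foldl_append, ih (by omega)]
      simp only [List.foldl_cons, List.foldl_nil]
      have hmod : PySem.Int.mod (1 + (k : Int)) 2 = (((1 + k) % 2 : Nat) : Int) := by
        exact_mod_cast PySem.Int.mod_natCast (1 + k) 2
      have hdiv : PySem.Int.floordiv (1 + (k : Int) - 1) 2 = ((k / 2 : Nat) : Int) := by
        have h1 : (1 + (k : Int) - 1) = ((k : Nat) : Int) := by omega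
        rw [h1]; exact_mod_cast PySem.Int.floordiv_natCast k 2
      have hT : (pvT js os).take (k + 1) = (pvT js os).take k ++ [
          if k % 2 = 0 then js.getD (k / 2) ' ' else os.getD (k / 2) ' '] := by
        rw [List.take_add_one, pvT_get js os hle hge k hkl]
        by_cases hp : k % 2 = 0
        · have hj2 : k / 2 < js.length := by omega
          simp [hp, List.getElem?_eq_getElem hj2, List.getD, Option.toList]
        · have ho1 : 1 ≤ os.length := by omega
          have ho2 : k / 2 < os.length := by omega
          simp [hp, List.getElem?_eq_getElem ho2, List.getD, Option.toList]
      rw [hT]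
      by_cases hp : k % 2 = 0
      · have h2 : PySem.Int.mod (1 + (k : Int)) 2 ≠ 0 := by
          intro hcon; rw [hmod] at hcon; omega
        rw [if_pos h2, hdiv, PySem.List.pyGetD_natCast, if_pos hp]
      · have h2 : PySem.Int.mod (1 + (k : Int)) 2 = 0 := by rw [hmod]; omega
        rw [if_neg (not_not_intro h2), hdiv, PySem.List.pyGetD_natCast, if_neg hp]

-- ===== VERDICT (by name: the statement is the Claim_ definition above) =====
theorem handle_paixu_spec : Claim_equal_handle_paixu := by
  intro n _
  unfold Spec_handle_paixu handle_paixu handle_paixu_alt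
  simp only [pvSlice_eo, pvSlice_oo, pvSplitA]
  set l := n.toList
  set js := PySem.List.sorted (pvEo l) (fun c => c) false with hjs
  set os := PySem.List.sorted (pvOo l) (fun c => c) false with hos
  have hlen := pvEo_oo_len l
  have hj : js.length = (pvEo l).length := PySem.List.length_sorted _ _ _
  have ho : os.length = (pvOo l).length := PySem.List.length_sorted _ _ _
  have hle : os.length ≤ js.length := by omega
  have hge : js.length ≤ os.length + 1 := by omega
  have hL : (l.length : Int) = ((js.length + os.length : Nat) : Int) := by
    push_cast; omega
  rw [hL, pvBuildA js os hle hge]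
  simp [pvT]
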